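-- pv_equiv track=rewrite | github.com/cole-brown/veredi-code | game/_old_entity/d20/old_entity/player.py | _dotted_split
-- ===== SOURCE A (Python) =====
-- def _dotted_split(name):
--     start = 0
--     while True:
--         index = name.find('.', start)
--         if index == -1:
--             break
--         yield name[start:index]
--         start = index + 1
-- ===== SOURCE B (Python) =====
-- def _dotted_split(name):
--     for part in name.split('.')[:-1]:
--         yield part
-- ===== Notes on version B (the rewrite author's own statement) =====
-- stated objective: simpler
-- what changed: Replaces the manual while-loop that maintains a moving start index and repeatedly calls name.find('.', start) with a single name.split('.') that materializes all segments, then drops the final segment with [:-1] and yields the rest.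
import Mathlib
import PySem

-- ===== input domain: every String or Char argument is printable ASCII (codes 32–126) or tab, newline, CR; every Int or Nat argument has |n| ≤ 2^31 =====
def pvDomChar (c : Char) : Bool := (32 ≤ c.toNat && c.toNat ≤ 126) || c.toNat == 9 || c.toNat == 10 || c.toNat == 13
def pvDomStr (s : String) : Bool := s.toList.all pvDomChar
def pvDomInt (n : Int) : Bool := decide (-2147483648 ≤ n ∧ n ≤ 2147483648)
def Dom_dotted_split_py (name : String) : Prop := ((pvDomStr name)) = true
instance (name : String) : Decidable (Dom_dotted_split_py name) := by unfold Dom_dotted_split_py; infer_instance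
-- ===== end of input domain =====

-- B replaces A's moving-index find('.') while-loop with split('.')[:-1]; objective: simpler.


-- ===== PORT A =====
-- Termination fact cited by pvAGo's decreasing_by: a successful find('.', start) points
-- at a dot at index ≥ start and < len(name), so the next start (index+1) strictly grows.
theorem pvAFind_lt (cs : List Char) (start : Nat)
    (h : PySem.Chars.findFrom cs ['.'] (start : Int) none ≠ -1) :
    (start : Int) ≤ PySem.Chars.findFrom cs ['.'] (start : Int) none ∧
      (PySem.Chars.findFrom cs ['.'] (start : Int) none).toNat < cs.length := by
  have hle : start ≤ cs.length := by
    by_contra hgt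
    apply h
    simp [PySem.Chars.findFrom]
    omega
  rw [PySem.Chars.findFrom_natCast cs ['.'] start hle] at h ⊢
  by_cases h1 : PySem.Chars.find (cs.drop start) ['.'] = -1
  · exact absurd (by rw [if_pos h1]) h
  · rw [if_neg h1] at h ⊢
    have hge : 0 ≤ PySem.Chars.find (cs.drop start) ['.'] := by
      have := PySem.Chars.neg_one_le_find (cs.drop start) ['.']
      omega
    have hspec := PySem.Chars.find_spec hge
    have hlt : (PySem.Chars.find (cs.drop start) ['.']).toNat < (cs.drop start).length := by
      by_contra hge2
      have hnil : (cs.drop start).drop (PySem.Chars.find (cs.drop start) ['.']).toNat = [] :=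
        List.drop_eq_nil_of_le (by omega)
      rw [hnil] at hspec
      exact absurd hspec.1 (by simp)
    simp only [List.length_drop] at hlt
    omega

-- A's while-loop: index = name.find('.', start); if index == -1: break;
-- yield name[start:index]; start = index + 1.
def pvAGo (cs : List Char) (start : Nat) : List (List Char) :=
  let index := PySem.Chars.findFrom cs ['.'] (start : Int) none
  if h : index = -1 then []
  else
    PySem.List.slice cs (some (start : Int)) (some index) ::
      pvAGo cs (index.toNat + 1)
termination_by cs.length - start
decreasing_by
  have := pvAFind_lt cs start h
  omega

def dotted_split_py (name : String) : List String :=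
  (pvAGo name.toList 0).map (fun cs => String.ofList cs)

-- ===== PORT B =====
-- B: for part in name.split('.')[:-1]: yield part
def dotted_split_py_alt (name : String) : List String :=
  (PySem.List.slice (PySem.Chars.splitOn name.toList ['.']) none (some (-1))).map
    (fun cs => String.ofList cs)

-- ===== PRECONDITION & SPEC =====
def Spec_dotted_split_py (name : String) (out : List String) : Prop := out = dotted_split_py_alt name
instance (name : String) (out : List String) : Decidable (Spec_dotted_split_py name out) := by unfold Spec_dotted_split_py; infer_instance

-- ===== CLAIM (what is proved, stated in full; the proofs are below) =====
def Claim_equal_dotted_split_py : Prop := ∀ (name : String), Dom_dotted_split_py name → Spec_dotted_split_py name (dotted_split_py name)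

-- ===== LEMMAS AND PROOFS =====

-- A singleton list is a prefix of l.drop i exactly when l[i] is that character.
theorem pvPrefix_drop (a : Char) (l : List Char) (i : Nat) (h : i < l.length) :
    [a] <+: l.drop i ↔ l[i] = a := by
  constructor
  · rintro ⟨t, ht⟩
    have h0 : (l.drop i)[0]? = some a := by rw [← ht]; rfl
    simpa [List.getElem?_drop, List.getElem?_eq_getElem h] using h0
  · intro ha
    refine ⟨l.drop (i + 1), ?_⟩
    rw [← List.getElem_cons_drop h, ha]
    rfl

-- Split at '.' characters, as a simple structural recursion (proof-side reference).
def pvSplit : List Char → List (List Char)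
  | [] => [[]]
  | c :: r =>
    if c = '.' then [] :: pvSplit r
    else
      match pvSplit r with
      | [] => [[c]]
      | h :: t => (c :: h) :: t

theorem pvSplit_ne_nil (l : List Char) : pvSplit l ≠ [] := by
  cases l with
  | nil => simp [pvSplit]
  | cons c r =>
    simp only [pvSplit]
    split_ifs
    · simp
    · cases h : pvSplit r <;> simp

theorem pvSplit_no_dot (l : List Char) (h : '.' ∉ l) : pvSplit l = [l] := by
  induction l with
  | nil => rfl
  | cons c r ih =>
    simp only [List.mem_cons, not_or] at h
    simp [pvSplit, Ne.symm h.1, ih h.2]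

theorem pvSplit_first_dot (l : List Char) (r : Nat)
    (hr : r < l.length) (hdot : l[r] = '.') (hno : '.' ∉ l.take r) :
    pvSplit l = l.take r :: pvSplit (l.drop (r + 1)) := by
  induction l generalizing r with
  | nil => simp at hr
  | cons c t ih =>
    cases r with
    | zero => simp_all [pvSplit]
    | succ n =>
      have hr' : n < t.length := by simpa using hr
      have hd : t[n] = '.' := by simpa using hdot
      have hno' : ¬ ('.' = c ∨ '.' ∈ t.take n) := by simpa using hno
      push Not at hno'
      simp only [pvSplit, List.take_succ_cons, List.drop_succ_cons]
      rw [if_neg (Ne.symm hno'.1), ih n hr' hd hno'.2]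

theorem pvGo_eq (l : List Char) : ∀ (fuel : Nat) (cur : List Char) (acc : List (List Char)),
    l.length < fuel →
    PySem.Chars.splitOn.go ['.'] fuel l cur acc =
      acc.reverse ++
        (match pvSplit l with
          | [] => []
          | h :: t => (cur.reverse ++ h) :: t) := by
  induction l with
  | nil =>
    intro fuel cur acc hf
    cases fuel with
    | zero => omega
    | succ f => simp [PySem.Chars.splitOn.go, pvSplit]
  | cons c rest ih =>
    intro fuel cur acc hf
    cases fuel with
    | zero => omega
    | succ f =>
      have hf' : rest.length < f := by simpa using hf
      by_cases hc : c = '.'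
      · subst hc
        rw [show PySem.Chars.splitOn.go ['.'] (f + 1) ('.' :: rest) cur acc =
              PySem.Chars.splitOn.go ['.'] f rest [] (cur.reverse :: acc) by
            simp [PySem.Chars.splitOn.go, List.isPrefixOf]]
        rw [ih f [] (cur.reverse :: acc) hf']
        cases hs : pvSplit rest with
        | nil => exact absurd hs (pvSplit_ne_nil rest)
        | cons h t => simp [pvSplit, hs]
      · rw [show PySem.Chars.splitOn.go ['.'] (f + 1) (c :: rest) cur acc =
              PySem.Chars.splitOn.go ['.'] f rest (c :: cur) acc by
            simp [PySem.Chars.splitOn.go, List.isPrefixOf, Ne.symm hc]]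
        rw [ih f (c :: cur) acc hf']
        cases hs : pvSplit rest with
        | nil => exact absurd hs (pvSplit_ne_nil rest)
        | cons h t => simp [pvSplit, hc, hs]

theorem pvSplitOn_eq (l : List Char) : PySem.Chars.splitOn l ['.'] = pvSplit l := by
  unfold PySem.Chars.splitOn
  rw [pvGo_eq l (l.length + 1) [] [] (by omega)]
  cases hs : pvSplit l with
  | nil => exact absurd hs (pvSplit_ne_nil l)
  | cons h t => simp

theorem pvAGo_eq (cs : List Char) : ∀ (k start : Nat), cs.length - start = k →
    start ≤ cs.length → pvAGo cs start = (pvSplit (cs.drop start)).dropLast := by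
  intro k
  induction k using Nat.strong_induction_on with
  | _ k ihk =>
    intro start hk hle
    rw [pvAGo]
    simp only [PySem.Chars.findFrom_natCast cs ['.'] start hle]
    by_cases h1 : PySem.Chars.find (cs.drop start) ['.'] = -1
    · rw [dif_pos (by rw [if_pos h1])]
      have hnd : '.' ∉ cs.drop start := by
        have := (PySem.Chars.find_eq_neg_one_iff (cs.drop start) ['.']).mp h1
        rwa [List.singleton_infix_iff] at this
      rw [pvSplit_no_dot _ hnd]
      rfl
    · have hge : 0 ≤ PySem.Chars.find (cs.drop start) ['.'] := by
        have := PySem.Chars.neg_one_le_find (cs.drop start) ['.']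
        omega
      set r := PySem.Chars.find (cs.drop start) ['.'] with hrdef
      have hspec := PySem.Chars.find_spec hge
      have hmlt : r.toNat < (cs.drop start).length := by
        by_contra hge2
        have hnil : (cs.drop start).drop r.toNat = [] := List.drop_eq_nil_of_le (by omega)
        rw [hnil] at hspec
        exact absurd hspec.1 (by simp)
      have hdlen : (cs.drop start).length = cs.length - start := by simp
      have hdot : (cs.drop start)[r.toNat] = '.' :=
        (pvPrefix_drop '.' (cs.drop start) r.toNat hmlt).mp hspec.1
      have hno : '.' ∉ (cs.drop start).take r.toNat := by
        intro hmem
        obtain ⟨i, hi, hget⟩ := List.getElem_of_mem hmem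
        have hilen : i < (cs.drop start).length := by
          have := List.length_take (l := cs.drop start) (i := r.toNat)
          omega
        have hitake : (cs.drop start)[i] = '.' := by
          rwa [List.getElem_take] at hget
        have hilt : i < r.toNat := by
          have := List.length_take (l := cs.drop start) (i := r.toNat)
          omega
        exact hspec.2 i hilt ((pvPrefix_drop '.' (cs.drop start) i hilen).mpr hitake)
      have hne : ¬ (if r = -1 then -1 else (start : Int) + r) = -1 := by
        rw [if_neg h1]; omega
      rw [dif_neg hne]
      rw [if_neg h1]
      have hcast : (start : Int) + r = ((start + r.toNat : Nat) : Int) := by push_cast; omega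
      rw [hcast, PySem.List.slice_natCast]
      rw [show ((((start + r.toNat : Nat)) : Int)).toNat = start + r.toNat by omega]
      have hlen2 : start + r.toNat < cs.length := by omega
      rw [ihk (cs.length - (start + r.toNat + 1)) (by omega) (start + r.toNat + 1) rfl (by omega)]
      rw [pvSplit_first_dot (cs.drop start) r.toNat hmlt hdot hno]
      rw [List.dropLast_cons_of_ne_nil (pvSplit_ne_nil _)]
      rw [show start + r.toNat - start = r.toNat by omega]
      congr 2
      rw [List.drop_drop, Nat.add_assoc]

-- ===== VERDICT (by name: the statement is the Claim_ definition above) =====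
theorem dotted_split_py_spec : Claim_equal_dotted_split_py := by
  intro name _
  unfold Spec_dotted_split_py dotted_split_py dotted_split_py_alt
  rw [pvAGo_eq name.toList (name.toList.length - 0) 0 rfl (by omega),
    pvSplitOn_eq, PySem.List.slice_to_neg_one]
  simp
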